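-- pv_equiv track=rewrite | github.com/mehta-lab/VisCy | applications/dynaclr/evaluation/linear_classifiers/utils.py | resolve_channel_name
-- ===== SOURCE A (Python) =====
-- CHANNEL_DEFAULTS: dict[str, dict] = {
--     "organelle": {
--         "keyword": "GFP",
--         "yaml_alias": "fluor",
--         "normalization_class": "viscy.transforms.ScaleIntensityRangePercentilesd",
--         "normalization_args": {
--             "lower": 50,
--             "upper": 99,
--             "b_min": 0.0,
--             "b_max": 1.0,
--         },
--         "batch_size": {"2d": 32, "3d": 64},
--         "num_workers": {"2d": 8, "3d": 16},
--     },
--     "phase": {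
--         "keyword": "Phase",
--         "yaml_alias": "Ph",
--         "normalization_class": "viscy.transforms.NormalizeSampled",
--         "normalization_args": {
--             "level": "fov_statistics",
--             "subtrahend": "mean",
--             "divisor": "std",
--         },
--         "batch_size": {"2d": 64, "3d": 64},
--         "num_workers": {"2d": 16, "3d": 16},
--     },
--     "sensor": {
--         "keyword": "mCherry",
--         "yaml_alias": "fluor",
--         "normalization_class": "viscy.transforms.ScaleIntensityRangePercentilesd",
--         "normalization_args": {
--             "lower": 50,
--             "upper": 99,
--             "b_min": 0.0,
--             "b_max": 1.0,
--         },
--         "batch_size": {"2d": 32, "3d": 64},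
--         "num_workers": {"2d": 8, "3d": 16},
--     },
-- }
--
-- def resolve_channel_name(
--     channel_names: list[str],
--     channel_type: str,
--     channel_overrides: dict[str, str] | None = None,
-- ) -> str | None:
--     """Find the full channel name by keyword substring match.
--
--     When multiple channels match the keyword, the ``raw`` variant is
--     preferred (e.g. ``"raw GFP EX488 EM525-45"`` over ``"GFP EX488 EM525-45"``).
--
--     Parameters
--     ----------
--     channel_names : list[str]
--         Channel names from the zarr dataset.
--     channel_type : str
--         One of "organelle", "phase", "sensor".
--     channel_overrides : dict[str, str] or None
--         Optional mapping of channel_type -> keyword override.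
--
--     Returns
--     -------
--     str or None
--         Matched channel name, or None if not found.
--     """
--     keyword = channel_overrides.get(channel_type) if channel_overrides else None
--     if keyword is None:
--         keyword = CHANNEL_DEFAULTS[channel_type]["keyword"]
--     matches = [name for name in channel_names if keyword in name]
--     if not matches:
--         return None
--     # Prefer the "raw" variant when both raw and processed exist
--     raw = [m for m in matches if m.lower().startswith("raw")]
--     return raw[0] if raw else matches[0]
-- ===== SOURCE B (Python) =====
-- CHANNEL_DEFAULTS: dict[str, dict] = {
--     "organelle": {"keyword": "GFP"},
--     "phase": {"keyword": "Phase"},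
--     "sensor": {"keyword": "mCherry"},
-- }
--
--
-- def resolve_channel_name(channel_names, channel_type, channel_overrides=None):
--     keyword = channel_overrides.get(channel_type) if channel_overrides else None
--     if keyword is None:
--         keyword = CHANNEL_DEFAULTS[channel_type]["keyword"]
--     # Rank-and-select: map each matching channel to the sort key
--     # (is-not-raw, index) and return the name at the minimal key.
--     best = min(
--         ((not name.lower().startswith("raw"), i)
--          for i, name in enumerate(channel_names)
--          if keyword in name),
--         default=None,
--     )
--     return None if best is None else channel_names[best[1]]
-- ===== Notes on version B (the rewrite author's own statement) =====
-- stated objective: alternative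
-- what changed: Replaces A's two staged filtering passes (collect all matches, then filter raw variants, then pick a head) with a rank-and-select: every matching channel is mapped to a sort key (is-not-raw, index) and the name at the lexicographically minimal key is returned via min(..., default=None).
import Mathlib
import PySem

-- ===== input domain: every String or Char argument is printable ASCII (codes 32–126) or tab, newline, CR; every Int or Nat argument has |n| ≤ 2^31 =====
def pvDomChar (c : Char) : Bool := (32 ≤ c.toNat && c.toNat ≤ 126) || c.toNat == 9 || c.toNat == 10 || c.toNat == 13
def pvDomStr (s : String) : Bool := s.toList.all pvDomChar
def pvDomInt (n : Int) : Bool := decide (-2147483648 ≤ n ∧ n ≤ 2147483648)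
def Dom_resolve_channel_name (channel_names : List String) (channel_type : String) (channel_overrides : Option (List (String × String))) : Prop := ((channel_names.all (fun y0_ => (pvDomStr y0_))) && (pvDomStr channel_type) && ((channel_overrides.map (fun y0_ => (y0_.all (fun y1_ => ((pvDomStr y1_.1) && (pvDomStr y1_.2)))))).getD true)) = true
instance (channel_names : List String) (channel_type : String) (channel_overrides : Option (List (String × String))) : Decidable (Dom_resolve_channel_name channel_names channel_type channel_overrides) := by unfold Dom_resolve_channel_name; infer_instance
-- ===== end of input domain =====

-- B replaces A's two staged filtering passes with a rank-and-select (min over keys (is-not-raw, index)); objective: alternative.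

-- shared keyword-resolution preamble (identical in A's and B's Python):
-- 'channel_overrides.get(channel_type) if channel_overrides else None', falling back to
-- CHANNEL_DEFAULTS[channel_type]["keyword"]; 'none' here = the KeyError case, excluded by Pre_.
def pvKeyword? (channel_type : String) (channel_overrides : Option (List (String × String))) : Option String :=
  let kw : Option String :=
    match channel_overrides with
    | some d => if d.isEmpty then none else (PySem.Dict.ofList d).get? channel_type
    | none => none
  match kw with
  | some k => some k
  | none =>
    if channel_type == "organelle" then some "GFP"
    else if channel_type == "phase" then some "Phase"
    else if channel_type == "sensor" then some "mCherry"
    else none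

-- ===== PORT A =====
def resolve_channel_name (channel_names : List String) (channel_type : String) (channel_overrides : Option (List (String × String))) : Option String :=
  match pvKeyword? channel_type channel_overrides with
  | none => none   -- KeyError in Python; outside Pre_
  | some keyword =>
    let matched := channel_names.filter (fun name => PySem.Str.isIn keyword name)
    if matched.isEmpty then none
    else
      let raw := matched.filter (fun m => PySem.Str.startswith (PySem.Str.lower m) "raw")
      match raw with
      | r :: _ => some r
      | [] => matched.head?

-- ===== PORT B =====
-- Source B's generator '((not name.lower().startswith("raw"), i) for i, name in enumerate(channel_names) if keyword in name)'
-- (indices are the nonnegative ints Python's enumerate yields, represented as Nat — exact here)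
def pvCands (keyword : String) : Nat → List String → List (Bool × Nat)
  | _, [] => []
  | i, name :: rest =>
    (if PySem.Str.isIn keyword name then
       [(!(PySem.Str.startswith (PySem.Str.lower name) "raw"), i)] else [])
      ++ pvCands keyword (i + 1) rest

-- Python's '<' on the (bool, int) key tuples: lexicographic, False < True
def pvLt (p q : Bool × Nat) : Bool := (!p.1 && q.1) || (p.1 == q.1 && p.2 < q.2)

-- Python's min(..., default=None): fold keeping the first extremal element
def pvMin? : List (Bool × Nat) → Option (Bool × Nat)
  | [] => none
  | p :: rest => some (rest.foldl (fun acc q => if pvLt q acc then q else acc) p)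

def resolve_channel_name_alt (channel_names : List String) (channel_type : String) (channel_overrides : Option (List (String × String))) : Option String :=
  match pvKeyword? channel_type channel_overrides with
  | none => none   -- KeyError in Python; outside Pre_
  | some keyword =>
    match pvMin? (pvCands keyword 0 channel_names) with
    | none => none
    | some best => channel_names[best.2]?   -- 'channel_names[best[1]]'; the index is in range by construction

-- ===== PRECONDITION & SPEC =====
-- Pre_ excludes exactly the inputs where A raises KeyError: no override keyword applies and
-- channel_type is not one of the three CHANNEL_DEFAULTS keys.
def Pre_resolve_channel_name (channel_names : List String) (channel_type : String) (channel_overrides : Option (List (String × String))) : Prop :=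
  (∃ d, channel_overrides = some d ∧ d ≠ [] ∧ channel_type ∈ d.map Prod.fst) ∨
    channel_type ∈ (["organelle", "phase", "sensor"] : List String)
instance (channel_names : List String) (channel_type : String) (channel_overrides : Option (List (String × String))) : Decidable (Pre_resolve_channel_name channel_names channel_type channel_overrides) := by unfold Pre_resolve_channel_name; infer_instance

def pvWitness_resolve_channel_name : List String × String × (Option (List (String × String))) :=
  (["raw GFP", "GFP"], "organelle", none)

def Spec_resolve_channel_name (channel_names : List String) (channel_type : String) (channel_overrides : Option (List (String × String))) (out : Option String) : Prop := out = resolve_channel_name_alt channel_names channel_type channel_overrides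
instance (channel_names : List String) (channel_type : String) (channel_overrides : Option (List (String × String))) (out : Option String) : Decidable (Spec_resolve_channel_name channel_names channel_type channel_overrides out) := by unfold Spec_resolve_channel_name; infer_instance

-- ===== CLAIM (what is proved, stated in full; the proofs are below) =====
def Claim_equal_resolve_channel_name : Prop := ∀ (channel_names : List String) (channel_type : String) (channel_overrides : Option (List (String × String))), Dom_resolve_channel_name channel_names channel_type channel_overrides → Pre_resolve_channel_name channel_names channel_type channel_overrides → Spec_resolve_channel_name channel_names channel_type channel_overrides (resolve_channel_name channel_names channel_type channel_overrides)

-- ===== LEMMAS AND PROOFS =====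

-- pvLt is a strict total order; the fold in pvMin? therefore computes the minimum of acc :: l
theorem pvFold_min (l : List (Bool × Nat)) (a : Bool × Nat) :
    l.foldl (fun acc q => if pvLt q acc then q else acc) a =
      (match pvMin? l with
       | none => a
       | some m => if pvLt m a then m else a) := by
  induction l generalizing a with
  | nil => rfl
  | cons q rest ih =>
    show rest.foldl _ (if pvLt q a then q else a) = _
    rw [ih]
    have hq : pvMin? (q :: rest) = some (rest.foldl (fun acc q => if pvLt q acc then q else acc) q) := rfl
    rw [hq, ih]
    obtain ⟨qb, qn⟩ := q; obtain ⟨ab, an⟩ := a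
    cases hm : pvMin? rest with
    | none => rfl
    | some m =>
      obtain ⟨mb, mn⟩ := m
      simp only [pvLt]
      cases qb <;> cases ab <;> cases mb <;>
        simp only [Bool.not_true, Bool.not_false, Bool.false_and, Bool.true_and,
          Bool.and_true, Bool.and_false, Bool.false_or, Bool.true_or,
          beq_self_eq_true, Bool.true_and, decide_eq_true_eq] <;>
        split_ifs <;> simp_all <;> omega

-- characterisation of B's min over the candidates of a suffix starting at offset i
theorem pvMin_cands (keyword : String) (l : List String) (i : Nat) :
    pvMin? (pvCands keyword i l) =
      (match l.findIdx? (fun n => PySem.Str.isIn keyword n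
            && PySem.Str.startswith (PySem.Str.lower n) "raw") with
       | some j => some (false, i + j)
       | none =>
         match l.findIdx? (fun n => PySem.Str.isIn keyword n) with
         | some j => some (true, i + j)
         | none => none) := by
  induction l generalizing i with
  | nil => rfl
  | cons n rest ih =>
    cases hin : PySem.Str.isIn keyword n with
    | false =>
      have hc : pvCands keyword i (n :: rest) = pvCands keyword (i + 1) rest := by
        rw [pvCands.eq_2, hin, if_neg (by simp)]; rfl
      rw [hc, ih]
      rw [List.findIdx?_cons, List.findIdx?_cons]
      simp only [hin, Bool.false_and]
      cases h1 : rest.findIdx? (fun n => PySem.Str.isIn keyword n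
            && PySem.Str.startswith (PySem.Str.lower n) "raw") with
      | some j => simp [Nat.add_assoc, Nat.add_comm 1 j]
      | none =>
        cases h2 : rest.findIdx? (fun n => PySem.Str.isIn keyword n) with
        | some j => simp [Nat.add_assoc, Nat.add_comm 1 j]
        | none => simp
    | true =>
      cases hraw : PySem.Str.startswith (PySem.Str.lower n) "raw" with
      | true =>
        have hc : pvCands keyword i (n :: rest) = (false, i) :: pvCands keyword (i + 1) rest := by
          rw [pvCands.eq_2, hin, hraw, if_pos rfl]; rfl
        rw [hc]
        show some (List.foldl _ (false, i) _) = _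
        rw [pvFold_min, ih]
        rw [List.findIdx?_cons]
        simp only [hin, hraw, Bool.and_self]
        cases h1 : rest.findIdx? (fun n => PySem.Str.isIn keyword n
              && PySem.Str.startswith (PySem.Str.lower n) "raw") with
        | some j => simp [pvLt]; omega
        | none =>
          cases h2 : rest.findIdx? (fun n => PySem.Str.isIn keyword n) with
          | some j => simp [pvLt]
          | none => rfl
      | false =>
        have hc : pvCands keyword i (n :: rest) = (true, i) :: pvCands keyword (i + 1) rest := by
          rw [pvCands.eq_2, hin, hraw, if_pos rfl]; rfl
        rw [hc]
        show some (List.foldl _ (true, i) _) = _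
        rw [pvFold_min, ih]
        rw [List.findIdx?_cons, List.findIdx?_cons]
        simp only [hin, hraw, Bool.and_false]
        cases h1 : rest.findIdx? (fun n => PySem.Str.isIn keyword n
              && PySem.Str.startswith (PySem.Str.lower n) "raw") with
        | some j =>
          simp only [Option.map_some]
          simp [pvLt]; omega
        | none =>
          simp only [Option.map_none]
          cases h2 : rest.findIdx? (fun n => PySem.Str.isIn keyword n) with
          | some j =>
            simp [pvLt]; omega
          | none => rfl

-- looking up the found index gives the found element
theorem getElem?_findIdx? {α : Type} (p : α → Bool) (l : List α) (j : Nat)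
    (h : l.findIdx? p = some j) : l[j]? = l.find? p := by
  induction l generalizing j with
  | nil => simp at h
  | cons x rest ih =>
    rw [List.findIdx?_cons] at h
    cases hx : p x with
    | true =>
      simp [hx] at h
      subst h
      simp [List.find?, hx]
    | false =>
      simp [hx] at h
      obtain ⟨j', hj', rfl⟩ := h
      simp [List.find?, hx, ih _ hj']

-- a successful findIdx? means the filtered list is nonempty
theorem filter_ne_nil_of_findIdx? {α : Type} (p : α → Bool) (l : List α) (j : Nat)
    (h : l.findIdx? p = some j) : l.filter p ≠ [] := by
  intro he
  have hlt := (List.findIdx?_eq_some_iff_findIdx_eq.mp h).1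
  have hg := getElem?_findIdx? p l j h
  rw [← List.head?_filter, he] at hg
  have := List.getElem?_eq_none_iff.mp hg
  omega

-- ===== VERDICT (by name: the statement is the Claim_ definition above) =====
theorem resolve_channel_name_spec : Claim_equal_resolve_channel_name := by
  intro channel_names channel_type channel_overrides _ _
  unfold Spec_resolve_channel_name resolve_channel_name resolve_channel_name_alt
  cases pvKeyword? channel_type channel_overrides with
  | none => rfl
  | some keyword =>
    dsimp only
    rw [pvMin_cands]
    have hff : (channel_names.filter (fun name => PySem.Str.isIn keyword name)).filter
          (fun m => PySem.Str.startswith (PySem.Str.lower m) "raw")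
        = channel_names.filter (fun n => PySem.Str.isIn keyword n
            && PySem.Str.startswith (PySem.Str.lower n) "raw") := by
      rw [List.filter_filter]
      exact List.filter_congr (fun x _ => Bool.and_comm _ _)
    cases h1 : channel_names.findIdx? (fun n => PySem.Str.isIn keyword n
          && PySem.Str.startswith (PySem.Str.lower n) "raw") with
    | some j =>
      dsimp only
      simp only [Nat.zero_add]
      rw [getElem?_findIdx? _ _ _ h1, ← List.head?_filter]
      have hraw : channel_names.filter (fun n => PySem.Str.isIn keyword n
            && PySem.Str.startswith (PySem.Str.lower n) "raw") ≠ [] :=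
        filter_ne_nil_of_findIdx? _ _ _ h1
      have hm : channel_names.filter (fun name => PySem.Str.isIn keyword name) ≠ [] := by
        intro he
        apply hraw
        rw [← hff, he]
        rfl
      rw [if_neg (fun hc => hm (List.isEmpty_iff.mp hc)), hff]
      cases hc : channel_names.filter (fun n => PySem.Str.isIn keyword n
            && PySem.Str.startswith (PySem.Str.lower n) "raw") with
      | nil => exact absurd hc hraw
      | cons r rs => rfl
    | none =>
      have hraw : (channel_names.filter (fun name => PySem.Str.isIn keyword name)).filter
            (fun m => PySem.Str.startswith (PySem.Str.lower m) "raw") = [] := by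
        rw [hff]
        exact List.filter_eq_nil_iff.mpr (fun x hx => by
          simpa using List.findIdx?_eq_none_iff.mp h1 x hx)
      cases h2 : channel_names.findIdx? (fun n => PySem.Str.isIn keyword n) with
      | some j =>
        dsimp only
        simp only [Nat.zero_add]
        rw [getElem?_findIdx? _ _ _ h2, ← List.head?_filter]
        have hm : channel_names.filter (fun n => PySem.Str.isIn keyword n) ≠ [] :=
          filter_ne_nil_of_findIdx? _ _ _ h2
        rw [if_neg (fun hc => hm (List.isEmpty_iff.mp hc)), hraw]
      | none =>
        have hm : channel_names.filter (fun n => PySem.Str.isIn keyword n) = [] :=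
          List.filter_eq_nil_iff.mpr (fun x hx => by
            simpa using List.findIdx?_eq_none_iff.mp h2 x hx)
        rw [if_pos (List.isEmpty_iff.mpr hm)]
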